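-- pv_equiv track=rewrite | github.com/ReiMatsui/pr1-group07-b08 | chari-spot/camera_system/src/utils/bicycle_detector.py | get_slot
-- ===== SOURCE A (Python) =====
-- def get_slot(cx: int, w: int, gap: int) -> int:
--     """
--     横 4 スロット＋ 3 ギャップ配置。
--     ギャップ領域なら 0、スロットなら 1–4 を返す。
--     """
--     slot_w = (w - 3 * gap) // 4
--     for i in range(4):
--         start = i * (slot_w + gap)
--         end = start + slot_w
--         if start <= cx < end:
--             return i + 1
--     return 0
-- ===== SOURCE B (Python) =====
-- def get_slot(cx: int, w: int, gap: int) -> int: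
--     slot_w = (w - 3 * gap) // 4
--     period = slot_w + gap
--     if period <= 0:
--         return 0
--     i, r = divmod(cx, period)
--     if 0 <= i < 4 and r < slot_w:
--         return i + 1
--     return 0
-- ===== Notes on version B (the rewrite author's own statement) =====
-- stated objective: alternative
-- what changed: Replaces A's 4-iteration interval scan with a single divmod: the quotient cx // (slot_w + gap) picks the unique candidate slot and the remainder is checked against slot_w; Pre_ excludes inputs with positive slot width but non-positive period (gap <= -slot_w), where the layout is inverted/degenerate and A's nonzero hits are overlap artefacts while B returns 0.
-- intended difference: When the period is positive but gap < 0 makes consecutive slots overlap and cx lies in an earlier slot while already past the start of a later period cell, A returns the smallest overlapping slot index while B returns the slot of cx's own period cell (or 0); on such overlapping layouts either choice is an equally valid reading of an unspecified corner. — e.g. on get_slot(1, 5, -1): A returns 1, B returns 2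
-- outside the precondition, e.g. on get_slot(0, 4, -4): A returns 1, B returns 0
import Mathlib
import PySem

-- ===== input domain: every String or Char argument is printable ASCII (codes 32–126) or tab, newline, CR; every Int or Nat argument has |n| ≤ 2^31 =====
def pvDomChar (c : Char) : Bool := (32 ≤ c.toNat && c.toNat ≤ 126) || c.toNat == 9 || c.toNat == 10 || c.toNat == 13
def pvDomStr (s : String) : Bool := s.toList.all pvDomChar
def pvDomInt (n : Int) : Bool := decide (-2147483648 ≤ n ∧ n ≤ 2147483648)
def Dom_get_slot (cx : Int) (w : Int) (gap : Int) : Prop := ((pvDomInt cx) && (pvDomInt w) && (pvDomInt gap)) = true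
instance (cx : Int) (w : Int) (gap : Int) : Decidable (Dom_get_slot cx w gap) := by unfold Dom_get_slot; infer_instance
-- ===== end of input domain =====

-- B replaces A's 4-interval scan by one divmod picking the unique candidate slot
-- (objective: alternative — closed-form index instead of a scan).

-- ===== PORT A =====
-- the 'for i in range(4): … return i + 1' loop with early return
def get_slot_loop (cx : Int) (slot_w : Int) (gap : Int) : List Int → Int
  | [] => 0
  | i :: rest =>
    let start := i * (slot_w + gap)
    let stop := start + slot_w
    if start ≤ cx ∧ cx < stop then i + 1 else get_slot_loop cx slot_w gap rest

def get_slot (cx : Int) (w : Int) (gap : Int) : Int :=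
  let slot_w := PySem.Int.floordiv (w - 3 * gap) 4
  get_slot_loop cx slot_w gap (PySem.List.pyRange 0 4 1)

-- ===== PORT B =====
def get_slot_alt (cx : Int) (w : Int) (gap : Int) : Int :=
  let slot_w := PySem.Int.floordiv (w - 3 * gap) 4
  let period := slot_w + gap
  if period ≤ 0 then 0
  else
    let i := PySem.Int.floordiv cx period
    let r := PySem.Int.mod cx period
    if 0 ≤ i ∧ i < 4 ∧ r < slot_w then i + 1 else 0

-- ===== PRECONDITION & SPEC =====
-- Pre_ excludes inputs with positive slot width but non-positive period slot_w + gap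
-- (only reachable with gap ≤ -slot_w): the slot layout is degenerate there — the
-- intervals run backwards and overlap — so any nonzero hit of A's scan is an artefact
-- of that overlap; B returns 0 on such layouts.
def Pre_get_slot (cx : Int) (w : Int) (gap : Int) : Prop :=
  0 < PySem.Int.floordiv (w - 3 * gap) 4 + gap ∨ PySem.Int.floordiv (w - 3 * gap) 4 ≤ 0
instance (cx : Int) (w : Int) (gap : Int) : Decidable (Pre_get_slot cx w gap) := by unfold Pre_get_slot; infer_instance

def pvWitness_get_slot : Int × Int × Int := (10, 100, 5)

-- On inputs where the period is positive but gap < 0 makes consecutive slots overlap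
-- and cx falls in an earlier slot while already past the start of a later period cell,
-- A returns the smallest overlapping slot index while B returns the slot of cx's own
-- period cell (or 0); on such overlapping layouts either choice is an equally valid
-- reading of an unspecified corner.
def D_get_slot (cx : Int) (w : Int) (gap : Int) : Prop :=
  0 < PySem.Int.floordiv (w - 3 * gap) 4 + gap ∧
  (let s := PySem.Int.floordiv (w - 3 * gap) 4
   let p := s + gap
   (p ≤ cx ∧ cx < s) ∨ (2 * p ≤ cx ∧ cx < p + s) ∨
   (3 * p ≤ cx ∧ cx < 2 * p + s) ∨ (4 * p ≤ cx ∧ cx < 3 * p + s))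
instance (cx : Int) (w : Int) (gap : Int) : Decidable (D_get_slot cx w gap) := by unfold D_get_slot; infer_instance

def Spec_get_slot (cx : Int) (w : Int) (gap : Int) (out : Int) : Prop :=
  ¬ D_get_slot cx w gap → out = get_slot_alt cx w gap
instance (cx : Int) (w : Int) (gap : Int) (out : Int) : Decidable (Spec_get_slot cx w gap out) := by unfold Spec_get_slot; infer_instance

def pvDiffWitness_get_slot : Int × Int × Int := (1, 5, -1)
def pvDiffWitnessOut_get_slot : Int × Int := (1, 2)

-- ===== CLAIM (what is proved, stated in full; the proofs are below) =====
def Claim_unchanged_get_slot : Prop := ∀ (cx : Int) (w : Int) (gap : Int), Dom_get_slot cx w gap → Pre_get_slot cx w gap → Spec_get_slot cx w gap (get_slot cx w gap)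
def Claim_changed_get_slot : Prop := Dom_get_slot (pvDiffWitness_get_slot.1) (pvDiffWitness_get_slot.2.1) (pvDiffWitness_get_slot.2.2) ∧ Pre_get_slot (pvDiffWitness_get_slot.1) (pvDiffWitness_get_slot.2.1) (pvDiffWitness_get_slot.2.2) ∧ D_get_slot (pvDiffWitness_get_slot.1) (pvDiffWitness_get_slot.2.1) (pvDiffWitness_get_slot.2.2) ∧ get_slot (pvDiffWitness_get_slot.1) (pvDiffWitness_get_slot.2.1) (pvDiffWitness_get_slot.2.2) = pvDiffWitnessOut_get_slot.1 ∧ get_slot_alt (pvDiffWitness_get_slot.1) (pvDiffWitness_get_slot.2.1) (pvDiffWitness_get_slot.2.2) = pvDiffWitnessOut_get_slot.2 ∧ pvDiffWitnessOut_get_slot.1 ≠ pvDiffWitnessOut_get_slot.2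
def Claim_exact_get_slot : Prop := ∀ (cx : Int) (w : Int) (gap : Int), Dom_get_slot cx w gap → Pre_get_slot cx w gap → D_get_slot cx w gap → get_slot cx w gap ≠ get_slot_alt cx w gap

-- ===== LEMMAS AND PROOFS =====

-- the scan and the divmod form agree, with the slot width abstracted, outside D_
theorem get_slot_core (cx s gap : Int)
    (hpre : 0 < s + gap ∨ s ≤ 0)
    (hD : ¬ (0 < s + gap ∧
      ((s + gap ≤ cx ∧ cx < s) ∨ (2 * (s + gap) ≤ cx ∧ cx < (s + gap) + s) ∨
       (3 * (s + gap) ≤ cx ∧ cx < 2 * (s + gap) + s) ∨ (4 * (s + gap) ≤ cx ∧ cx < 3 * (s + gap) + s)))) :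
    get_slot_loop cx s gap [0, 1, 2, 3] =
      (if s + gap ≤ 0 then 0
       else if 0 ≤ PySem.Int.floordiv cx (s + gap) ∧ PySem.Int.floordiv cx (s + gap) < 4 ∧
               PySem.Int.mod cx (s + gap) < s
         then PySem.Int.floordiv cx (s + gap) + 1 else 0) := by
  show (if 0 * (s + gap) ≤ cx ∧ cx < 0 * (s + gap) + s then 0 + 1 else
        if 1 * (s + gap) ≤ cx ∧ cx < 1 * (s + gap) + s then 1 + 1 else
        if 2 * (s + gap) ≤ cx ∧ cx < 2 * (s + gap) + s then 2 + 1 else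
        if 3 * (s + gap) ≤ cx ∧ cx < 3 * (s + gap) + s then 3 + 1 else 0) = _
  by_cases hp : s + gap ≤ 0
  · rw [if_pos hp]
    have hs : s ≤ 0 := by omega
    split_ifs <;> omega
  · rw [if_neg hp]
    have hppos : 0 < s + gap := by omega
    have hq : PySem.Int.floordiv cx (s + gap) * (s + gap) ≤ cx ∧
        cx < (PySem.Int.floordiv cx (s + gap) + 1) * (s + gap) :=
      (PySem.Int.floordiv_eq_iff_of_pos hppos).mp rfl
    have hr : PySem.Int.floordiv cx (s + gap) * (s + gap) + PySem.Int.mod cx (s + gap) = cx :=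
      PySem.Int.floordiv_mul_add_mod cx (s + gap)
    set q := PySem.Int.floordiv cx (s + gap) with hqdef
    set r := PySem.Int.mod cx (s + gap) with hrdef
    have hq1 : q * (s + gap) ≤ cx := hq.1
    have hq2 : cx < (q + 1) * (s + gap) := hq.2
    clear hq hqdef hrdef
    by_cases hqneg : q < 0
    · have hmul : (q + 1) * (s + gap) ≤ 0 * (s + gap) :=
        mul_le_mul_of_nonneg_right (by omega) (by omega)
      split_ifs <;> omega
    · by_cases hq4 : q ≤ 3
      · have h0 : 0 ≤ q := by omega
        interval_cases q <;> (split_ifs <;> omega)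
      · have hmul : (4 : Int) * (s + gap) ≤ q * (s + gap) :=
          mul_le_mul_of_nonneg_right (by omega) (by omega)
        split_ifs <;> omega

-- inside D_ the two forms disagree everywhere, slot width abstracted
theorem get_slot_core_ne (cx s gap : Int)
    (hD : 0 < s + gap ∧
      ((s + gap ≤ cx ∧ cx < s) ∨ (2 * (s + gap) ≤ cx ∧ cx < (s + gap) + s) ∨
       (3 * (s + gap) ≤ cx ∧ cx < 2 * (s + gap) + s) ∨ (4 * (s + gap) ≤ cx ∧ cx < 3 * (s + gap) + s))) :
    get_slot_loop cx s gap [0, 1, 2, 3] ≠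
      (if s + gap ≤ 0 then 0
       else if 0 ≤ PySem.Int.floordiv cx (s + gap) ∧ PySem.Int.floordiv cx (s + gap) < 4 ∧
               PySem.Int.mod cx (s + gap) < s
         then PySem.Int.floordiv cx (s + gap) + 1 else 0) := by
  obtain ⟨hppos, hj⟩ := hD
  show (if 0 * (s + gap) ≤ cx ∧ cx < 0 * (s + gap) + s then 0 + 1 else
        if 1 * (s + gap) ≤ cx ∧ cx < 1 * (s + gap) + s then 1 + 1 else
        if 2 * (s + gap) ≤ cx ∧ cx < 2 * (s + gap) + s then 2 + 1 else
        if 3 * (s + gap) ≤ cx ∧ cx < 3 * (s + gap) + s then 3 + 1 else 0) ≠ _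
  rw [if_neg (by omega : ¬ s + gap ≤ 0)]
  have hq : PySem.Int.floordiv cx (s + gap) * (s + gap) ≤ cx ∧
      cx < (PySem.Int.floordiv cx (s + gap) + 1) * (s + gap) :=
    (PySem.Int.floordiv_eq_iff_of_pos hppos).mp rfl
  have hr : PySem.Int.floordiv cx (s + gap) * (s + gap) + PySem.Int.mod cx (s + gap) = cx :=
    PySem.Int.floordiv_mul_add_mod cx (s + gap)
  set q := PySem.Int.floordiv cx (s + gap) with hqdef
  set r := PySem.Int.mod cx (s + gap) with hrdef
  have hq1 : q * (s + gap) ≤ cx := hq.1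
  have hq2 : cx < (q + 1) * (s + gap) := hq.2
  clear hq hqdef hrdef
  -- from the D_ disjunct, q is strictly larger than the matched slot index
  rcases hj with h | h | h | h
  · have hqge : 1 ≤ q := by
      by_contra hc
      have : (q + 1) * (s + gap) ≤ 1 * (s + gap) :=
        mul_le_mul_of_nonneg_right (by omega) (by omega)
      omega
    by_cases hq4 : q ≤ 3
    · interval_cases q <;> (split_ifs <;> omega)
    · have hmul : (4 : Int) * (s + gap) ≤ q * (s + gap) :=
        mul_le_mul_of_nonneg_right (by omega) (by omega)
      split_ifs <;> omega
  · have hqge : 2 ≤ q := by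
      by_contra hc
      have : (q + 1) * (s + gap) ≤ 2 * (s + gap) :=
        mul_le_mul_of_nonneg_right (by omega) (by omega)
      omega
    by_cases hq4 : q ≤ 3
    · interval_cases q <;> (split_ifs <;> omega)
    · have hmul : (4 : Int) * (s + gap) ≤ q * (s + gap) :=
        mul_le_mul_of_nonneg_right (by omega) (by omega)
      split_ifs <;> omega
  · have hqge : 3 ≤ q := by
      by_contra hc
      have : (q + 1) * (s + gap) ≤ 3 * (s + gap) :=
        mul_le_mul_of_nonneg_right (by omega) (by omega)
      omega
    by_cases hq4 : q ≤ 3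
    · interval_cases q <;> (split_ifs <;> omega)
    · have hmul : (4 : Int) * (s + gap) ≤ q * (s + gap) :=
        mul_le_mul_of_nonneg_right (by omega) (by omega)
      split_ifs <;> omega
  · have hqge : 4 ≤ q := by
      by_contra hc
      have : (q + 1) * (s + gap) ≤ 4 * (s + gap) :=
        mul_le_mul_of_nonneg_right (by omega) (by omega)
      omega
    have hmul : (4 : Int) * (s + gap) ≤ q * (s + gap) :=
      mul_le_mul_of_nonneg_right (by omega) (by omega)
    split_ifs <;> omega

-- ===== VERDICT (by name: the statements are the Claim_ definitions above) =====
theorem get_slot_spec : Claim_unchanged_get_slot := by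
  intro cx w gap _ hpre hD
  unfold get_slot get_slot_alt
  have hr : PySem.List.pyRange 0 4 1 = [0, 1, 2, 3] := by decide
  rw [hr]
  exact get_slot_core cx (PySem.Int.floordiv (w - 3 * gap) 4) gap hpre
    (by unfold D_get_slot at hD; simpa using hD)

theorem get_slot_changed : Claim_changed_get_slot := by
  unfold Claim_changed_get_slot; decide

theorem get_slot_tight : Claim_exact_get_slot := by
  intro cx w gap _ _ hD
  unfold get_slot get_slot_alt
  have hr : PySem.List.pyRange 0 4 1 = [0, 1, 2, 3] := by decide
  rw [hr]
  exact get_slot_core_ne cx (PySem.Int.floordiv (w - 3 * gap) 4) gap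
    (by unfold D_get_slot at hD; simpa using hD)
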